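-- pv_equiv track=rewrite | github.com/mooncake-0/Problem_Solving | bj/2307_km_test/2.py | solution
-- ===== SOURCE A (Python) =====
-- def judge(route, cur, dest):
--     if cur == dest:
--         return True
--     if cur in route:
--         if cur + 1 in route[cur]:
--             return judge(route, cur + 1, dest)
--         else:
--             return False
--     else:
--         return False
--
-- def solution(N, A, B):
--     # N ~ 100,0000
--     route = dict()
--     for idx in range(len(A)):
--         if A[idx] not in route:
--             tmp = set()
--             tmp.add(B[idx])
--             route[A[idx]] = tmp
--         else:
--             route[A[idx]].add(B[idx])
--
--         ''' 반대편 '''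
--         if B[idx] not in route:
--             tmp = set()
--             tmp.add(A[idx])
--             route[B[idx]] = tmp
--         else:
--             route[B[idx]].add(A[idx])
--
--     return judge(route, 1, N)
-- ===== SOURCE B (Python) =====
-- def solution(N, A, B):
--     # One flat set of normalized undirected edges; the chain 1-2-...-N exists iff
--     # N == 1, or N >= 1 and the number of distinct edges of the form (i, i+1) with
--     # 1 <= i < N equals N - 1 (the edge set holds each pair at most once).
--     edges = {(min(a, b), max(a, b)) for a, b in zip(A, B)}
--     hits = sum(1 for a, b in edges if b == a + 1 and 1 <= a < N)
--     return N == 1 or (1 <= N and hits == N - 1)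
-- ===== Notes on version B (the rewrite author's own statement) =====
-- stated objective: alternative
-- what changed: Replaces the adjacency-dict-of-neighbour-sets plus recursive chain walk by a set comprehension of normalized undirected edge pairs over zip(A,B) and a count of the distinct consecutive edges (i,i+1) with 1<=i<N compared against N-1.
import Mathlib
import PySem

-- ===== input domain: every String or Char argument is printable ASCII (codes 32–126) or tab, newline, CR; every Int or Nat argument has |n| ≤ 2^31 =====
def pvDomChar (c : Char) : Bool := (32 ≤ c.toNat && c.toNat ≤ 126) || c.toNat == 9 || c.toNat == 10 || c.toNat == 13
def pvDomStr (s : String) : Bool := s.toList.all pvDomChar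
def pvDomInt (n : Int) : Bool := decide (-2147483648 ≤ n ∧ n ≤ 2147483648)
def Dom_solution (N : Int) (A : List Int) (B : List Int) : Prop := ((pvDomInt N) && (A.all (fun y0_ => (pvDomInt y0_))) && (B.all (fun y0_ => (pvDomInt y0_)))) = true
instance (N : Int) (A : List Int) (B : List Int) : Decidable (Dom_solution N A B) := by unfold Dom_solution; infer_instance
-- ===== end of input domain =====

-- B replaces A's adjacency-dict-of-neighbour-sets plus recursive chain walk by a set
-- comprehension of normalized undirected edge pairs over zip(A,B) and a count of the
-- distinct consecutive edges (i, i+1) with 1 <= i < N, compared with N - 1 (objective: alternative).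

-- termination measure fact, cited by judge's decreasing_by: stepping from c to c+1 strictly
-- shrinks the count of elements whose key is ≥ c, when some element has key exactly c
theorem pvFilterSuccLt {α : Type} (l : List α) (f : α → Int) (c : Int)
    (h : ∃ x ∈ l, f x = c) :
    (l.filter (fun x => decide (c + 1 ≤ f x))).length <
      (l.filter (fun x => decide (c ≤ f x))).length := by
  suffices hs : (l.filter (fun x => decide (c < f x))).length <
      (l.filter (fun x => decide (c ≤ f x))).length by simpa using hs
  induction l with
  | nil => simp at h
  | cons y l ih =>
    rcases h with ⟨x, hx, hfx⟩
    simp only [List.mem_cons] at hx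
    simp only [List.filter_cons]
    by_cases hy2 : c < f y
    · have hxl : x ∈ l := by
        rcases hx with h | h
        · exfalso; rw [h] at hfx; omega
        · exact h
      have := ih ⟨x, hxl, hfx⟩
      rw [if_pos (show decide (c < f y) = true by simpa using hy2),
        if_pos (show decide (c ≤ f y) = true by simp; omega)]
      simp only [List.length_cons]
      omega
    · by_cases hy : f y = c
      · have hle : (l.filter (fun x => decide (c < f x))).length ≤
            (l.filter (fun x => decide (c ≤ f x))).length := by
          rw [← List.countP_eq_length_filter, ← List.countP_eq_length_filter]
          exact List.countP_mono_left (by intro a _ ha; simp at ha ⊢; omega)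
        rw [if_neg (show ¬ decide (c < f y) = true by simpa using hy2),
          if_pos (show decide (c ≤ f y) = true by simp; omega)]
        simp only [List.length_cons]
        omega
      · have hxl : x ∈ l := by
          rcases hx with h | h
          · exact absurd (h ▸ hfx) hy
          · exact h
        have := ih ⟨x, hxl, hfx⟩
        rw [if_neg (show ¬ decide (c < f y) = true by simpa using hy2),
          if_neg (show ¬ decide (c ≤ f y) = true by simp; omega)]
        omega

-- ===== PORT A =====
-- one 'if A[idx] not in route: route[A[idx]] = {B[idx]} else: route[A[idx]].add(B[idx])' block
def pvRouteStep (route : PySem.Dict Int (PySem.Set Int)) (a b : Int) :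
    PySem.Dict Int (PySem.Set Int) :=
  if route.contains a = false then
    route.insert a (PySem.Set.add PySem.Set.empty b)
  else
    route.insert a (PySem.Set.add (route.getD a PySem.Set.empty) b)

def judge (route : PySem.Dict Int (PySem.Set Int)) (cur dest : Int) : Bool :=
  if cur = dest then true
  else if hc : route.contains cur = true then
    if PySem.Set.contains (route.getD cur PySem.Set.empty) (cur + 1) = true then
      judge route (cur + 1) dest
    else false
  else false
termination_by (route.keys.filter (fun k => decide (cur ≤ k))).length
decreasing_by
  exact pvFilterSuccLt route.keys (fun k => k) cur
    ⟨cur, (PySem.Dict.contains_iff_mem_keys route cur).1 hc, rfl⟩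

def solution (N : Int) (A : List Int) (B : List Int) : Bool :=
  let route := (PySem.List.pyRange 0 (A.length : Int) 1).foldl
    (fun route idx =>
      -- A[idx] / B[idx]; in-range under Pre_solution (pyGetD's default is never read there)
      let a := PySem.List.pyGetD A idx 0
      let b := PySem.List.pyGetD B idx 0
      pvRouteStep (pvRouteStep route a b) b a)
    PySem.Dict.empty
  judge route 1 N

-- ===== PORT B =====
def solution_alt (N : Int) (A : List Int) (B : List Int) : Bool :=
  -- edges = {(min(a,b), max(a,b)) for a, b in zip(A, B)}
  let edges : PySem.Set (Int × Int) :=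
    PySem.Set.ofList ((A.zip B).map (fun p => (min p.1 p.2, max p.1 p.2)))
  -- hits = sum(1 for a, b in edges if b == a + 1 and 1 <= a < N)   (order-independent sum over the set)
  let hits : Int :=
    edges.foldl (fun acc p => if p.2 = p.1 + 1 ∧ 1 ≤ p.1 ∧ p.1 < N then acc + 1 else acc) 0
  -- N == 1 or (1 <= N and hits == N - 1)
  decide (N = 1) || (decide (1 ≤ N) && decide (hits = N - 1))

-- ===== PRECONDITION & SPEC =====
-- Pre_ excludes exactly the inputs with len(A) > len(B), where Python A raises IndexError on B[idx]
def Pre_solution (N : Int) (A : List Int) (B : List Int) : Prop := A.length ≤ B.length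
instance (N : Int) (A : List Int) (B : List Int) : Decidable (Pre_solution N A B) := by
  unfold Pre_solution; infer_instance
def pvWitness_solution : Int × List Int × List Int := (3, [1, 3], [2, 2])

def Spec_solution (N : Int) (A : List Int) (B : List Int) (out : Bool) : Prop := out = solution_alt N A B
instance (N : Int) (A : List Int) (B : List Int) (out : Bool) : Decidable (Spec_solution N A B out) := by
  unfold Spec_solution; infer_instance

-- ===== CLAIM (what is proved, stated in full; the proofs are below) =====
def Claim_equal_solution : Prop := ∀ (N : Int) (A : List Int) (B : List Int), Dom_solution N A B → Pre_solution N A B → Spec_solution N A B (solution N A B)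

-- ===== LEMMAS AND PROOFS =====

theorem pvSetContains {α : Type} [BEq α] [LawfulBEq α] (s : PySem.Set α) (x : α) :
    PySem.Set.contains s x = true ↔ x ∈ s := by
  simp [PySem.Set.contains]

-- the invariant tying A's route dict to B's edge set:
-- c has c+1 as recorded neighbour  ↔  the normalized pair (c, c+1) is in the edge set
def pvRel (r : PySem.Dict Int (PySem.Set Int)) (e : PySem.Set (Int × Int)) : Prop :=
  ∀ c : Int, ((c + 1) ∈ r.getD c PySem.Set.empty ↔ (c, c + 1) ∈ e)

theorem pvGetD_routeStep (r : PySem.Dict Int (PySem.Set Int)) (a b c : Int) :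
    (pvRouteStep r a b).getD c PySem.Set.empty =
      if c = a then PySem.Set.add (r.getD a PySem.Set.empty) b
      else r.getD c PySem.Set.empty := by
  by_cases h2 : c = a
  · subst h2
    unfold pvRouteStep
    by_cases h1 : r.contains c = false
    · simp only [if_pos h1, PySem.Dict.getD_insert,
        PySem.Dict.getD_of_not_contains r _ h1]
    · simp only [if_neg h1, PySem.Dict.getD_insert]
  · unfold pvRouteStep
    by_cases h1 : r.contains a = false
    · simp only [if_pos h1, PySem.Dict.getD_insert, if_neg h2]
    · simp only [if_neg h1, PySem.Dict.getD_insert, if_neg h2]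

-- membership after one loop iteration of A: the old neighbours plus the new (a, b) edge, both ways
theorem pvStep2_mem (r : PySem.Dict Int (PySem.Set Int)) (a b c : Int) :
    ((c + 1) ∈ (pvRouteStep (pvRouteStep r a b) b a).getD c PySem.Set.empty) ↔
      ((c + 1) ∈ r.getD c PySem.Set.empty ∨ (a = c ∧ b = c + 1) ∨ (b = c ∧ a = c + 1)) := by
  simp only [pvGetD_routeStep]
  by_cases h1 : c = b
  · subst h1
    by_cases h2 : c = a
    · subst h2
      rw [if_pos rfl, if_pos rfl, PySem.Set.mem_add, PySem.Set.mem_add]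
      constructor
      · rintro ((hm | hf) | hf)
        · exact Or.inl hm
        · omega
        · omega
      · rintro (hm | (⟨_, hf⟩ | ⟨_, hf⟩))
        · exact Or.inl (Or.inl hm)
        · omega
        · omega
    · rw [if_pos rfl, if_neg h2, PySem.Set.mem_add]
      constructor
      · rintro (hm | hf)
        · exact Or.inl hm
        · exact Or.inr (Or.inr ⟨rfl, hf.symm⟩)
      · rintro (hm | (⟨ha, hb⟩ | ⟨hb, ha⟩))
        · exact Or.inl hm
        · omega
        · exact Or.inr ha.symm
  · by_cases h2 : c = a
    · subst h2
      rw [if_neg h1, if_pos rfl, PySem.Set.mem_add]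
      constructor
      · rintro (hm | hf)
        · exact Or.inl hm
        · exact Or.inr (Or.inl ⟨rfl, hf.symm⟩)
      · rintro (hm | (⟨ha, hb⟩ | ⟨hb, ha⟩))
        · exact Or.inl hm
        · exact Or.inr hb.symm
        · omega
    · rw [if_neg h1, if_neg h2]
      constructor
      · exact Or.inl
      · rintro (hm | (⟨ha, hb⟩ | ⟨hb, ha⟩))
        · exact hm
        · omega
        · omega

theorem pvRel_step (r : PySem.Dict Int (PySem.Set Int)) (e : PySem.Set (Int × Int))
    (a b : Int) (h : pvRel r e) :
    pvRel (pvRouteStep (pvRouteStep r a b) b a) (PySem.Set.add e (min a b, max a b)) := by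
  intro c
  have hpair : ((c, c + 1) = (min a b, max a b)) ↔ (a = c ∧ b = c + 1) ∨ (b = c ∧ a = c + 1) := by
    rw [Prod.ext_iff]
    simp only [min_def, max_def]
    split_ifs <;> constructor <;> (intro h'; omega)
  rw [pvStep2_mem, PySem.Set.mem_add, hpair, h c]

-- the invariant holds between A's fold and B's fold, both walking the same pair list
theorem pvRel_zip_fold (l : List (Int × Int)) :
    ∀ (r : PySem.Dict Int (PySem.Set Int)) (e : PySem.Set (Int × Int)), pvRel r e →
    pvRel
      (l.foldl (fun route p => pvRouteStep (pvRouteStep route p.1 p.2) p.2 p.1) r)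
      (l.foldl (fun edges p => PySem.Set.add edges (min p.1 p.2, max p.1 p.2)) e) := by
  induction l with
  | nil => intro r e h; exact h
  | cons x l ih =>
    intro r e h
    exact ih _ _ (pvRel_step r e _ _ h)

-- A's index loop over range(len(A)) is the fold over the paired list zip(A, B)
theorem pvAFold_eq_zip (A B : List Int) (h : A.length ≤ B.length) :
    (PySem.List.pyRange 0 (A.length : Int) 1).foldl
      (fun route idx =>
        let a := PySem.List.pyGetD A idx 0
        let b := PySem.List.pyGetD B idx 0
        pvRouteStep (pvRouteStep route a b) b a)
      PySem.Dict.empty =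
    (A.zip B).foldl (fun route p => pvRouteStep (pvRouteStep route p.1 p.2) p.2 p.1)
      PySem.Dict.empty := by
  have hlen : (A.zip B).length = A.length := by
    rw [List.length_zip]; omega
  rw [show (A.length : Int) = ((A.zip B).length : Int) by rw [hlen]]
  rw [← PySem.List.foldl_pyRange_zero_pyGetD' (A.zip B) (0, 0)
    (fun route p => pvRouteStep (pvRouteStep route p.1 p.2) p.2 p.1) PySem.Dict.empty]
  apply PySem.List.foldl_congr_mem
  intro acc idx hidx
  rw [PySem.List.mem_pyRange_one] at hidx
  have hnat : idx.toNat < (A.zip B).length := by omega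
  have hA : idx.toNat < A.length := by omega
  have hB : idx.toNat < B.length := by omega
  rw [PySem.List.pyGetD_of_nonneg A 0 hidx.1, PySem.List.pyGetD_of_nonneg B 0 hidx.1,
    PySem.List.pyGetD_of_nonneg (A.zip B) (0, 0) hidx.1,
    List.getD_eq_getElem _ _ hnat, List.getD_eq_getElem _ _ hA, List.getD_eq_getElem _ _ hB,
    List.getElem_zip]

-- the chain walk is the flat membership test: judge r cur dest = (cur ≤ dest ∧ all edges present)
theorem pvJudge_eq_all (r : PySem.Dict Int (PySem.Set Int))
    (e : PySem.Set (Int × Int)) (h : pvRel r e) (dest cur : Int) :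
    judge r cur dest =
      (decide (cur ≤ dest) &&
        (PySem.List.pyRange cur dest 1).all (fun i => PySem.Set.contains e (i, i + 1))) := by
  induction cur using judge.induct r dest with
  | case1 =>
    rw [judge.eq_def, if_pos rfl, PySem.List.pyRange_one_eq_nil (le_refl _)]
    simp
  | case2 cur hd hc hm ih =>
    rw [judge.eq_def, if_neg hd, dif_pos hc, if_pos hm, ih]
    have he : PySem.Set.contains e (cur, cur + 1) = true :=
      (pvSetContains _ _).2 ((h cur).1 ((pvSetContains _ _).1 hm))
    by_cases hlt : cur < dest
    · rw [PySem.List.pyRange_one_cons hlt]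
      simp only [List.all_cons, he, Bool.true_and]
      have : (decide (cur ≤ dest)) = true := by simp; omega
      have h2 : (decide (cur + 1 ≤ dest)) = true := by simp; omega
      rw [this, h2]
    · have h1 : (decide (cur ≤ dest)) = false := by simp; omega
      have h2 : (decide (cur + 1 ≤ dest)) = false := by simp; omega
      rw [h1, h2, Bool.false_and, Bool.false_and]
  | case3 cur hd hc hm =>
    rw [judge.eq_def, if_neg hd, dif_pos hc, if_neg hm]
    have he : PySem.Set.contains e (cur, cur + 1) = false := by
      rw [Bool.eq_false_iff]
      intro habs
      exact hm ((pvSetContains _ _).2 ((h cur).2 ((pvSetContains _ _).1 habs)))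
    by_cases hlt : cur < dest
    · rw [PySem.List.pyRange_one_cons hlt]
      simp only [List.all_cons, he, Bool.false_and, Bool.and_false]
    · have h1 : (decide (cur ≤ dest)) = false := by simp; omega
      rw [h1, Bool.false_and]
  | case4 cur hd hc =>
    rw [judge.eq_def, if_neg hd, dif_neg hc]
    have hget : r.getD cur PySem.Set.empty = PySem.Set.empty :=
      PySem.Dict.getD_of_not_contains r _ (by simpa using hc)
    have he : PySem.Set.contains e (cur, cur + 1) = false := by
      rw [Bool.eq_false_iff]
      intro habs
      have hmem : (cur + 1) ∈ r.getD cur PySem.Set.empty :=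
        (h cur).2 ((pvSetContains _ _).1 habs)
      rw [hget] at hmem
      simp [PySem.Set.empty] at hmem
    by_cases hlt : cur < dest
    · rw [PySem.List.pyRange_one_cons hlt]
      simp only [List.all_cons, he, Bool.false_and, Bool.and_false]
    · have h1 : (decide (cur ≤ dest)) = false := by simp; omega
      rw [h1, Bool.false_and]

-- counting characterization: on a duplicate-free edge list, the number of consecutive pairs
-- (i, i+1) with 1 ≤ i < N equals N - 1 exactly when every such pair is present
theorem pvCount_eq_iff (e : List (Int × Int)) (hnd : e.Nodup) (N : Int) (hN : 1 ≤ N) :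
    ((e.countP (fun p => decide (p.2 = p.1 + 1 ∧ 1 ≤ p.1 ∧ p.1 < N)) : Int) = N - 1) ↔
      (∀ i : Int, 1 ≤ i → i < N → (i, i + 1) ∈ e) := by
  have hshape : ∀ p ∈ e.filter (fun p => decide (p.2 = p.1 + 1 ∧ 1 ≤ p.1 ∧ p.1 < N)),
      p.2 = p.1 + 1 ∧ 1 ≤ p.1 ∧ p.1 < N := by
    intro p hp
    simpa using List.of_mem_filter hp
  have hFnd := hnd.filter (fun p => decide (p.2 = p.1 + 1 ∧ 1 ≤ p.1 ∧ p.1 < N))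
  have hmapnd : ((e.filter (fun p => decide (p.2 = p.1 + 1 ∧ 1 ≤ p.1 ∧ p.1 < N))).map
      Prod.fst).Nodup := by
    refine List.Nodup.map_on ?_ hFnd
    intro x hx y hy hxy
    have hxs := hshape x hx
    have hys := hshape y hy
    rw [Prod.ext_iff]
    exact ⟨hxy, by rw [hxs.1, hys.1, hxy]⟩
  have hcardS : ((e.filter (fun p => decide (p.2 = p.1 + 1 ∧ 1 ≤ p.1 ∧ p.1 < N))).map
      Prod.fst).toFinset.card =
      (e.filter (fun p => decide (p.2 = p.1 + 1 ∧ 1 ≤ p.1 ∧ p.1 < N))).length := by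
    rw [List.toFinset_card_of_nodup hmapnd, List.length_map]
  have hsub : ((e.filter (fun p => decide (p.2 = p.1 + 1 ∧ 1 ≤ p.1 ∧ p.1 < N))).map
      Prod.fst).toFinset ⊆ Finset.Ico 1 N := by
    intro i hi
    simp only [List.mem_toFinset, List.mem_map] at hi
    obtain ⟨p, hp, rfl⟩ := hi
    have := hshape p hp
    rw [Finset.mem_Ico]
    omega
  have hmemS : ∀ i : Int,
      i ∈ ((e.filter (fun p => decide (p.2 = p.1 + 1 ∧ 1 ≤ p.1 ∧ p.1 < N))).map
        Prod.fst).toFinset ↔ ((i, i + 1) ∈ e ∧ 1 ≤ i ∧ i < N) := by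
    intro i
    constructor
    · intro hi
      simp only [List.mem_toFinset, List.mem_map] at hi
      obtain ⟨p, hp, rfl⟩ := hi
      have hs := hshape p hp
      have hpe : p ∈ e := List.mem_of_mem_filter hp
      have hpeq : p = (p.1, p.1 + 1) := by rw [Prod.ext_iff]; exact ⟨rfl, hs.1⟩
      rw [hpeq] at hpe
      exact ⟨hpe, hs.2⟩
    · rintro ⟨hmem, h1, h2⟩
      simp only [List.mem_toFinset, List.mem_map]
      exact ⟨(i, i + 1), List.mem_filter.2 ⟨hmem, by simp; omega⟩, rfl⟩
  rw [List.countP_eq_length_filter]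
  constructor
  · intro hcnt i h1 h2
    have hcard : (Finset.Ico (1 : Int) N).card ≤
        ((e.filter (fun p => decide (p.2 = p.1 + 1 ∧ 1 ≤ p.1 ∧ p.1 < N))).map
          Prod.fst).toFinset.card := by
      rw [hcardS, Int.card_Ico]
      omega
    have hSeq := Finset.eq_of_subset_of_card_le hsub hcard
    have hiS : i ∈ ((e.filter (fun p => decide (p.2 = p.1 + 1 ∧ 1 ≤ p.1 ∧ p.1 < N))).map
        Prod.fst).toFinset := by
      rw [hSeq, Finset.mem_Ico]
      omega
    exact ((hmemS i).1 hiS).1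
  · intro hall
    have hSeq : ((e.filter (fun p => decide (p.2 = p.1 + 1 ∧ 1 ≤ p.1 ∧ p.1 < N))).map
        Prod.fst).toFinset = Finset.Ico 1 N := by
      apply Finset.Subset.antisymm hsub
      intro i hi
      rw [Finset.mem_Ico] at hi
      exact (hmemS i).2 ⟨hall i hi.1 hi.2, hi⟩
    have hlen := hcardS
    rw [hSeq, Int.card_Ico] at hlen
    omega

-- ===== VERDICT (by name: the statements are the Claim_ definitions above) =====
theorem solution_spec : Claim_equal_solution := by
  intro N A B _ hpre
  unfold Spec_solution solution solution_alt
  rw [pvAFold_eq_zip A B hpre]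
  have hrel : pvRel
      ((A.zip B).foldl (fun route p => pvRouteStep (pvRouteStep route p.1 p.2) p.2 p.1)
        PySem.Dict.empty)
      (PySem.Set.ofList ((A.zip B).map (fun p => (min p.1 p.2, max p.1 p.2)))) := by
    rw [PySem.Set.ofList_eq_foldl, List.foldl_map]
    exact pvRel_zip_fold (A.zip B) _ _
      (by intro c; simp [PySem.Dict.getD_empty, PySem.Set.empty])
  rw [pvJudge_eq_all _ _ hrel N 1]
  dsimp only
  rw [PySem.List.foldl_ite_add_one (fun p : Int × Int => p.2 = p.1 + 1 ∧ 1 ≤ p.1 ∧ p.1 < N)]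
  have hnd : (PySem.Set.ofList ((A.zip B).map (fun p => (min p.1 p.2, max p.1 p.2)))).Nodup :=
    PySem.Set.nodup_ofList _
  by_cases hN : 1 ≤ N
  · have h1 : decide (1 ≤ N) = true := by simp [hN]
    rw [h1, Bool.true_and, Bool.true_and]
    by_cases hN1 : N = 1
    · subst hN1
      rw [PySem.List.pyRange_one_eq_nil (le_refl 1)]
      simp
    · have h2 : decide (N = 1) = false := by simp [hN1]
      rw [h2, Bool.false_or, Bool.eq_iff_iff]
      simp only [List.all_eq_true, decide_eq_true_eq, zero_add]
      have hiff := pvCount_eq_iff _ hnd N hN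
      constructor
      · intro hall
        refine hiff.2 ?_
        intro i hi1 hi2
        exact (pvSetContains _ _).1 (hall i (PySem.List.mem_pyRange_one.2 ⟨hi1, hi2⟩))
      · intro hcnt i hi
        rw [PySem.List.mem_pyRange_one] at hi
        exact (pvSetContains _ _).2 (hiff.1 hcnt i hi.1 hi.2)
  · have h1 : decide (1 ≤ N) = false := by simp; omega
    have h2 : decide (N = 1) = false := by simp; omega
    rw [h1, h2]
    simp
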